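-- pv_equiv track=rewrite | github.com/Linaro/lava | setup.py | merge_data_files
-- ===== SOURCE A (Python) =====
-- def merge_data_files(srcs):
--     data_files = [{i[0]: i[1] for i in src} for src in srcs if src]
--     ret = {}
--     for data in data_files:
--         for k, v in data.items():
--             if k in ret:
--                 ret[k].extend(v)
--             else:
--                 ret[k] = v
--     return sorted((k, sorted(set(v))) for (k, v) in ret.items())
-- ===== SOURCE B (Python) =====
-- def _group(pairs):
--     # pairs is sorted by key; merge each run of equal keys into one (key, sorted-set) entry
--     out = []
--     i = 0
--     n = len(pairs)
--     while i < n: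
--         k = pairs[i][0]
--         acc = set(pairs[i][1])
--         i += 1
--         while i < n and pairs[i][0] == k:
--             acc.update(pairs[i][1])
--             i += 1
--         out.append((k, sorted(acc)))
--     return out
--
--
-- def merge_data_files(srcs):
--     pairs = []
--     for src in srcs:
--         if src:
--             pairs.extend({i[0]: i[1] for i in src}.items())
--     pairs.sort(key=lambda p: p[0])
--     return _group(pairs)
-- ===== Notes on version B (the rewrite author's own statement) =====
-- stated objective: alternative
-- what changed: Instead of A's intermediate accumulator dict that extends per-key value lists and a final sort of the (key, sorted-set) tuples, B flattens all per-source dict items into one list, sorts it once by key, and merges each adjacent run of equal keys into a (key, sorted set-union) entry in a single pass; return values are identical, though A additionally mutates first-seen value lists of its argument in place while B does not.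
import Mathlib
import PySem

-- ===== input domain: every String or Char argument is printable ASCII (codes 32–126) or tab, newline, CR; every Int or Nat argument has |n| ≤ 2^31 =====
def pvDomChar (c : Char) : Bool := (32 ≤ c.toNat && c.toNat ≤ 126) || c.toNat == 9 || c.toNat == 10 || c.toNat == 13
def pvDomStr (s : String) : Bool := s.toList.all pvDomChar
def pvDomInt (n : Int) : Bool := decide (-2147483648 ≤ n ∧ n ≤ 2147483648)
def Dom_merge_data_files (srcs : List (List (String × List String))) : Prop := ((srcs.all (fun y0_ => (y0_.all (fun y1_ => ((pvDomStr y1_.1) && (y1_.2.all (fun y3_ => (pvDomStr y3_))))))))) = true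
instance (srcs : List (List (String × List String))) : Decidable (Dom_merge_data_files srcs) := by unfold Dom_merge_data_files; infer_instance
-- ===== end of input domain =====

-- B flattens the per-source dicts' pairs into one list, sorts it by key once and merges adjacent
-- equal-key runs, instead of A's accumulator dict; equivalence is about the RETURN value only:
-- A mutates first-seen value lists of its argument in place (ret[k].extend(v)), B does not.

-- ===== PORT A =====
def merge_data_files (srcs : List (List (String × List String))) : List (String × List String) :=
  -- data_files = [{i[0]: i[1] for i in src} for src in srcs if src]
  let data_files := (srcs.filter (fun src => !src.isEmpty)).map (fun src => PySem.Dict.ofList src)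
  -- for data in data_files: for k, v in data.items(): …
  let ret := data_files.foldl (fun ret data =>
    data.items.foldl (fun ret kv =>
      if ret.contains kv.1 then
        -- ret[k].extend(v): in-place extend keeps the key's position, as Dict.insert on an existing key does
        ret.insert kv.1 (ret.getD kv.1 [] ++ kv.2)
      else
        ret.insert kv.1 kv.2) ret) PySem.Dict.empty
  -- sorted((k, sorted(set(v))) for (k, v) in ret.items()): Python compares the (str, list) tuples lexicographically
  PySem.List.sorted2
    (ret.items.map (fun kv => (kv.1, PySem.List.sorted (PySem.Set.ofList kv.2) (fun x => x) false)))
    (fun p => p.1) (fun p => p.2) false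

-- ===== PORT B =====
-- _group(pairs): the outer while loop consumes the remaining suffix of pairs (structural recursion);
-- the inner while loop scanning the run of equal keys is the takeWhile/dropWhile split of the tail
def pvGroup : List (String × List String) → List (String × List String)
  | [] => []
  | (k, vs) :: rest =>
    let run := rest.takeWhile (fun p => p.1 == k)
    let acc := run.foldl (fun s p => PySem.Set.update s p.2) (PySem.Set.ofList vs)
    (k, PySem.List.sorted acc (fun x => x) false) :: pvGroup (rest.dropWhile (fun p => p.1 == k))
termination_by q => q.length
decreasing_by
  have := List.length_dropWhile_le (fun p => p.1 == k) rest
  simp; omega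

def merge_data_files_alt (srcs : List (List (String × List String))) : List (String × List String) :=
  -- for src in srcs: if src: pairs.extend({i[0]: i[1] for i in src}.items())
  let pairs := srcs.foldl (fun acc src =>
    if !src.isEmpty then acc ++ (PySem.Dict.ofList src).items else acc) []
  -- pairs.sort(key=lambda p: p[0]); return _group(pairs)
  pvGroup (PySem.List.sorted pairs (fun p => p.1) false)

-- ===== PRECONDITION & SPEC =====
def Spec_merge_data_files (srcs : List (List (String × List String))) (out : List (String × List String)) : Prop := out = merge_data_files_alt srcs
instance (srcs : List (List (String × List String))) (out : List (String × List String)) : Decidable (Spec_merge_data_files srcs out) := by unfold Spec_merge_data_files; infer_instance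

-- ===== CLAIM (what is proved, stated in full; the proofs are below) =====
def Claim_equal_merge_data_files : Prop := ∀ (srcs : List (List (String × List String))), Dom_merge_data_files srcs → Spec_merge_data_files srcs (merge_data_files srcs)

-- ===== LEMMAS AND PROOFS =====

def pvStep (r : PySem.Dict String (List String)) (kv : String × List String) : PySem.Dict String (List String) :=
  if r.contains kv.1 then r.insert kv.1 (r.getD kv.1 [] ++ kv.2) else r.insert kv.1 kv.2

def pvVals (k : String) (pairs : List (String × List String)) : List String :=
  (pairs.filter (fun p => p.1 == k)).flatMap (fun p => p.2)

theorem pvStep_eq (r : PySem.Dict String (List String)) (kv : String × List String) :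
    pvStep r kv = r.insert kv.1 (if r.contains kv.1 then r.getD kv.1 [] ++ kv.2 else kv.2) := by
  unfold pvStep; split_ifs <;> rfl

theorem pv_getD_foldl (pairs : List (String × List String)) (d : PySem.Dict String (List String)) (k : String) :
    (pairs.foldl pvStep d).getD k [] = d.getD k [] ++ pvVals k pairs := by
  induction pairs generalizing d with
  | nil => simp [pvVals]
  | cons p ps ih =>
    rw [List.foldl_cons, ih]
    have hstep : (pvStep d p).getD k [] = d.getD k [] ++ (if p.1 == k then p.2 else []) := by
      rw [pvStep_eq, PySem.Dict.getD_insert]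
      by_cases hk : k = p.1
      · rw [if_pos hk]
        have hbeq : (p.1 == k) = true := by simp [hk]
        rw [hbeq, if_pos rfl]
        cases hc : d.contains p.1 with
        | false =>
          rw [if_neg Bool.false_ne_true, hk, PySem.Dict.getD_of_not_contains d [] hc, List.nil_append]
        | true => rw [if_pos rfl, hk]
      · have hbeq : (p.1 == k) = false := by
          rw [beq_eq_false_iff_ne]; exact fun h => hk h.symm
        rw [if_neg hk, hbeq, if_neg Bool.false_ne_true, List.append_nil]
    rw [hstep]
    have hv : pvVals k (p :: ps) = (if p.1 == k then p.2 else []) ++ pvVals k ps := by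
      by_cases hpk : p.1 == k <;> simp [pvVals, List.filter_cons, hpk]
    rw [hv, List.append_assoc]

theorem pv_keys_foldl (pairs : List (String × List String)) (d : PySem.Dict String (List String)) :
    (pairs.foldl pvStep d).keys = PySem.Set.update d.keys (pairs.map (fun p => p.1)) := by
  have hc : pairs.foldl pvStep d
      = pairs.foldl (fun r kv => r.insert kv.1 (if r.contains kv.1 then r.getD kv.1 [] ++ kv.2 else kv.2)) d := by
    exact PySem.List.foldl_congr_mem pairs _ _ d (fun r kv _ => pvStep_eq r kv)
  rw [hc, PySem.Dict.keys_foldl_insert_key pairs (fun p => p.1) _ d]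

theorem pv_nodup_keys_foldl (pairs : List (String × List String)) (d : PySem.Dict String (List String))
    (h : d.keys.Nodup) : (pairs.foldl pvStep d).keys.Nodup := by
  have hc : pairs.foldl pvStep d
      = pairs.foldl (fun r kv => r.insert kv.1 (if r.contains kv.1 then r.getD kv.1 [] ++ kv.2 else kv.2)) d := by
    exact PySem.List.foldl_congr_mem pairs _ _ d (fun r kv _ => pvStep_eq r kv)
  rw [hc]
  exact PySem.Dict.nodup_keys_foldl_insert_key pairs (fun p => p.1) _ d h

theorem pv_ofList_sublist {α : Type} [BEq α] [LawfulBEq α] (l : List α) : (PySem.Set.ofList l).Sublist l := by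
  induction l with
  | nil => simp [PySem.Set.ofList_nil]
  | cons x xs ih =>
    rw [PySem.Set.ofList_cons]
    have hd : ((PySem.Set.ofList xs).discard x).Sublist (PySem.Set.ofList xs) := List.filter_sublist
    exact List.Sublist.cons₂ x (hd.trans ih)

theorem pv_insertBy_congr {α : Type} (b1 b2 : α → α → Bool) (x : α) (ys : List α)
    (h : ∀ y ∈ ys, b1 x y = b2 x y) : PySem.List.insertBy b1 x ys = PySem.List.insertBy b2 x ys := by
  induction ys with
  | nil => rfl
  | cons y ys ih =>
    rw [PySem.List.insertBy, PySem.List.insertBy]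
    rw [h y (List.mem_cons_self)]
    split_ifs with hb
    · rfl
    · rw [ih (fun z hz => h z (List.mem_cons_of_mem _ hz))]

theorem pv_insertBy_perm {α : Type} (b : α → α → Bool) (x : α) (ys : List α) :
    (PySem.List.insertBy b x ys).Perm (x :: ys) := by
  induction ys with
  | nil => exact List.Perm.refl _
  | cons y ys ih =>
    rw [PySem.List.insertBy]
    split_ifs with hb
    · exact List.Perm.refl _
    · exact (ih.cons y).trans (List.Perm.swap x y ys)

theorem pv_sorted2_eq_sorted {α : Type} (xs : List α) (k1 : α → String) (k2 : α → List String)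
    (h : (xs.map k1).Nodup) : PySem.List.sorted2 xs k1 k2 false = PySem.List.sorted xs k1 false := by
  rw [PySem.List.sorted_eq_foldl_insertBy]
  show xs.foldl (fun acc x => PySem.List.insertBy
      (fun a b => decide (k1 a < k1 b) || !decide (k1 b < k1 a) && decide (k2 a < k2 b)) x acc) [] = _
  suffices H : ∀ (l acc : List α), ((l.map k1) ++ (acc.map k1)).Nodup →
      l.foldl (fun acc x => PySem.List.insertBy
          (fun a b => decide (k1 a < k1 b) || !decide (k1 b < k1 a) && decide (k2 a < k2 b)) x acc) acc =
      l.foldl (fun acc x => PySem.List.insertBy (fun a b => decide (k1 a < k1 b)) x acc) acc by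
    exact H xs [] (by simpa using h)
  intro l
  induction l with
  | nil => intro acc _; rfl
  | cons x l ih =>
    intro acc hnd
    have hx : ∀ y ∈ acc, k1 x ≠ k1 y := by
      intro y hy heq
      have : k1 x ∈ l.map k1 ++ acc.map k1 := by
        refine List.mem_append_right _ ?_
        rw [heq]; exact List.mem_map_of_mem hy
      simp only [List.map_cons, List.cons_append, List.nodup_cons] at hnd
      exact hnd.1 this
    have hcong : PySem.List.insertBy
        (fun a b => decide (k1 a < k1 b) || !decide (k1 b < k1 a) && decide (k2 a < k2 b)) x acc =
        PySem.List.insertBy (fun a b => decide (k1 a < k1 b)) x acc := by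
      refine pv_insertBy_congr _ _ x acc (fun y hy => ?_)
      rcases lt_trichotomy (k1 x) (k1 y) with hlt | heq | hgt
      · simp [hlt]
      · exact absurd heq (hx y hy)
      · simp [hgt, not_lt_of_gt hgt]
    rw [List.foldl_cons, List.foldl_cons, hcong]
    refine ih _ ?_
    have h1 : ((PySem.List.insertBy (fun a b => decide (k1 a < k1 b)) x acc).map k1).Perm
        (k1 x :: acc.map k1) := (pv_insertBy_perm _ x acc).map k1
    have hperm : (l.map k1 ++ ((PySem.List.insertBy (fun a b => decide (k1 a < k1 b)) x acc).map k1)).Perm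
        (k1 x :: (l.map k1 ++ acc.map k1)) :=
      (List.Perm.append_left (l.map k1) h1).trans List.perm_middle
    have hnd' : (k1 x :: (l.map k1 ++ acc.map k1)).Nodup := by
      simpa using hnd
    exact hperm.symm.nodup hnd'

def pvCanon (pairs : List (String × List String)) (k : String) : String × List String :=
  (k, PySem.List.sorted (PySem.Set.ofList (pvVals k pairs)) (fun x => x) false)

theorem pv_foldl_update (run : List (String × List String)) (s : PySem.Set String) :
    run.foldl (fun s p => PySem.Set.update s p.2) s = PySem.Set.update s (run.flatMap (fun p => p.2)) := by
  induction run generalizing s with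
  | nil => rfl
  | cons p run ih => rw [List.foldl_cons, ih, List.flatMap_cons, PySem.Set.update_append]

theorem pv_ofList_cons_runs (k : String) (l1 l2 : List String)
    (h1 : ∀ x ∈ l1, x = k) (h2 : ∀ x ∈ l2, x ≠ k) :
    PySem.Set.ofList (k :: (l1 ++ l2)) = k :: PySem.Set.ofList l2 := by
  have hk : PySem.Set.ofList [k] = [k] := PySem.Set.ofList_eq_self_of_nodup _ (by simp)
  have e1 : k :: (l1 ++ l2) = [k] ++ (l1 ++ l2) := rfl
  rw [e1, PySem.Set.ofList_append, hk, PySem.Set.update_append]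
  have hupd1 : PySem.Set.update [k] l1 = [k] := by
    rw [PySem.Set.update_eq_append_filter]
    have : List.filter (fun y => !PySem.Set.contains [k] y) (PySem.Set.ofList l1) = [] := by
      rw [List.filter_eq_nil_iff]
      intro y hy
      have : y = k := h1 y ((PySem.Set.mem_ofList _ _).mp hy)
      subst this
      have hc : PySem.Set.contains [y] y = true := (PySem.Set.contains_iff _ _).mpr (by simp)
      simp [hc]
    rw [this, List.append_nil]
  rw [hupd1, PySem.Set.update_eq_append_filter]
  have : List.filter (fun y => !PySem.Set.contains [k] y) (PySem.Set.ofList l2) = PySem.Set.ofList l2 := by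
    rw [List.filter_eq_self]
    intro y hy
    have hyk : y ≠ k := h2 y ((PySem.Set.mem_ofList _ _).mp hy)
    have hc : PySem.Set.contains [k] y = false := by
      rw [← Bool.not_eq_true, PySem.Set.contains_iff]
      simp [hyk]
    simp [hyk]
  rw [this]
  rfl

theorem pv_group_eq (q : List (String × List String)) (h : q.Pairwise (fun a b => a.1 ≤ b.1)) :
    pvGroup q = (PySem.Set.ofList (q.map (fun p => p.1))).map (pvCanon q) := by
  induction q using pvGroup.induct with
  | case1 => simp [pvGroup, PySem.Set.ofList_nil]
  | case2 k vs rest ih =>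
    rw [pvGroup]
    set p : (String × List String) → Bool := (fun pr => pr.1 == k) with hp
    set run := rest.takeWhile p with hrun
    set rest' := rest.dropWhile p with hrest'
    rw [List.pairwise_cons] at h
    obtain ⟨hhead, hrest⟩ := h
    have hsplit : run ++ rest' = rest := List.takeWhile_append_dropWhile
    have hrunk : ∀ x ∈ run, x.1 = k := by
      intro x hx
      have := List.mem_takeWhile_imp (hrun ▸ hx)
      simpa [hp] using this
    have hrest'sub : rest'.Sublist rest := hrest' ▸ List.dropWhile_sublist p
    have hrest'pw : rest'.Pairwise (fun a b => a.1 ≤ b.1) := List.Pairwise.sublist hrest'sub hrest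
    have hne : ∀ x ∈ rest', x.1 ≠ k := by
      cases hcase : rest' with
      | nil => simp
      | cons hd tl =>
        have hdw : List.dropWhile p rest = hd :: tl := hrest'.symm.trans hcase
        have hdf : p hd = false := by
          have hnil : List.dropWhile p rest ≠ [] := by rw [hdw]; simp
          have h0 := List.head_dropWhile_not p hnil
          simpa [hdw] using h0
        have hdk : hd.1 ≠ k := by simpa [hp] using hdf
        have hdmem : hd ∈ rest := hrest'sub.mem (by rw [hcase]; exact List.mem_cons_self)
        have hklt : k < hd.1 := lt_of_le_of_ne (hhead hd hdmem) (fun e => hdk e.symm)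
        intro x hx
        rcases List.mem_cons.mp hx with rfl | hxt
        · exact hdk
        · have hpw := hrest'pw
          rw [hcase, List.pairwise_cons] at hpw
          have : hd.1 ≤ x.1 := hpw.1 x hxt
          exact fun e => absurd (e ▸ this) (not_le_of_gt hklt)
    have hfrun : List.filter (fun pr => pr.1 == k) run = run :=
      List.filter_eq_self.mpr (fun a ha => by simp [hrunk a ha])
    have hfrest' : List.filter (fun pr => pr.1 == k) rest' = [] :=
      List.filter_eq_nil_iff.mpr (fun a ha => by simp [hne a ha])
    have hq_filter : pvVals k ((k, vs) :: rest) = vs ++ run.flatMap (fun pr => pr.2) := by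
      unfold pvVals
      rw [List.filter_cons, ← hsplit, List.filter_append, hfrun, hfrest', List.append_nil]
      simp
    have hacc : run.foldl (fun s pr => PySem.Set.update s pr.2) (PySem.Set.ofList vs)
        = PySem.Set.ofList (pvVals k ((k, vs) :: rest)) := by
      rw [pv_foldl_update, hq_filter, PySem.Set.ofList_append]
    have hvals' : ∀ k', k' ≠ k → pvVals k' ((k, vs) :: rest) = pvVals k' rest' := by
      intro k' hk'
      unfold pvVals
      rw [List.filter_cons, ← hsplit, List.filter_append]
      have h1 : (((k, vs).1 == k') = false) := beq_eq_false_iff_ne.mpr (Ne.symm hk')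
      have h2 : List.filter (fun pr => pr.1 == k') run = [] :=
        List.filter_eq_nil_iff.mpr (fun a ha => by simp [hrunk a ha, Ne.symm hk'])
      rw [h2]
      simp [h1]
    have hkeys : PySem.Set.ofList (((k, vs) :: rest).map (fun pr => pr.1))
        = k :: PySem.Set.ofList (rest'.map (fun pr => pr.1)) := by
      have e : ((k, vs) :: rest).map (fun pr => pr.1)
          = k :: (run.map (fun pr => pr.1) ++ rest'.map (fun pr => pr.1)) := by
        rw [List.map_cons, ← hsplit, List.map_append]
      rw [e, pv_ofList_cons_runs k _ _ ?_ ?_]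
      · intro x hx
        obtain ⟨a, ha, rfl⟩ := List.mem_map.mp hx
        exact hrunk a ha
      · intro x hx
        obtain ⟨a, ha, rfl⟩ := List.mem_map.mp hx
        exact hne a ha
    rw [hkeys, List.map_cons]
    congr 1
    · rw [hacc]; rfl
    · rw [ih hrest'pw]
      apply List.map_congr_left
      intro a ha
      have ha' : a ∈ rest'.map (fun pr => pr.1) := (PySem.Set.mem_ofList _ _).mp ha
      have hak : a ≠ k := by
        obtain ⟨x, hx, rfl⟩ := List.mem_map.mp ha'
        exact hne x hx
      unfold pvCanon
      rw [hvals' a hak]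

theorem pv_canon_perm (u v : List (String × List String)) (hp : u.Perm v) (k : String) :
    pvCanon u k = pvCanon v k := by
  unfold pvCanon
  have hvals : (pvVals k u).Perm (pvVals k v) :=
    List.Perm.flatMap (hp.filter _) (fun a _ => List.Perm.refl _)
  have hof : (PySem.Set.ofList (pvVals k u)).Perm (PySem.Set.ofList (pvVals k v)) := by
    rw [List.perm_ext_iff_of_nodup (PySem.Set.nodup_ofList _) (PySem.Set.nodup_ofList _)]
    intro a
    rw [PySem.Set.mem_ofList, PySem.Set.mem_ofList]
    exact ⟨fun h => hvals.mem_iff.mp h, fun h => hvals.mem_iff.mpr h⟩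
  rw [PySem.List.sorted_eq_sorted_of_perm _ _ (fun x => x) (fun a b e => e) hof]

theorem pv_foldl_items (ds : List (PySem.Dict String (List String))) (init : PySem.Dict String (List String)) :
    ds.foldl (fun r d => d.items.foldl pvStep r) init = (ds.flatMap PySem.Dict.items).foldl pvStep init := by
  induction ds generalizing init with
  | nil => rfl
  | cons d ds ih => simp [List.foldl_append, ih]

theorem pv_merge_eq (srcs : List (List (String × List String))) :
    merge_data_files srcs = merge_data_files_alt srcs := by
  show (let data_files := (srcs.filter (fun src => !src.isEmpty)).map (fun src => PySem.Dict.ofList src)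
    let ret := data_files.foldl (fun ret data =>
      data.items.foldl (fun ret kv =>
        if ret.contains kv.1 then ret.insert kv.1 (ret.getD kv.1 [] ++ kv.2)
        else ret.insert kv.1 kv.2) ret) PySem.Dict.empty
    PySem.List.sorted2
      (ret.items.map (fun kv => (kv.1, PySem.List.sorted (PySem.Set.ofList kv.2) (fun x => x) false)))
      (fun p => p.1) (fun p => p.2) false)
    = (let pairs := srcs.foldl (fun acc src =>
        if !src.isEmpty then acc ++ (PySem.Dict.ofList src).items else acc) []
      pvGroup (PySem.List.sorted pairs (fun p => p.1) false))
  simp only []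
  set P : List (String × List String) :=
    (srcs.filter (fun src => !src.isEmpty)).flatMap (fun src => (PySem.Dict.ofList src).items) with hP
  -- B's flat pair list is P
  have hpairs : srcs.foldl (fun acc src =>
      if !src.isEmpty then acc ++ (PySem.Dict.ofList src).items else acc) [] = P := by
    rw [PySem.List.foldl_if_eq_foldl_filter (fun src => !src.isEmpty)
      (fun acc src => acc ++ (PySem.Dict.ofList src).items) srcs []]
    rw [PySem.List.foldl_append_eq_flatMap (fun src => (PySem.Dict.ofList src).items)]
    rw [List.nil_append]
  -- A's accumulator dict folds pvStep over P
  have hret : ((srcs.filter (fun src => !src.isEmpty)).map (fun src => PySem.Dict.ofList src)).foldl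
      (fun ret data => data.items.foldl (fun ret kv =>
        if ret.contains kv.1 then ret.insert kv.1 (ret.getD kv.1 [] ++ kv.2)
        else ret.insert kv.1 kv.2) ret) PySem.Dict.empty = P.foldl pvStep PySem.Dict.empty := by
    have : (fun (ret : PySem.Dict String (List String)) (kv : String × List String) =>
        if ret.contains kv.1 then ret.insert kv.1 (ret.getD kv.1 [] ++ kv.2)
        else ret.insert kv.1 kv.2) = pvStep := rfl
    rw [this, pv_foldl_items, List.flatMap_map]
  set ret := P.foldl pvStep PySem.Dict.empty with hretdef
  have hnodup : ret.keys.Nodup := pv_nodup_keys_foldl P _ (by simp [PySem.Dict.nodup_keys_empty])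
  have hkeys : ret.keys = PySem.Set.ofList (P.map (fun p => p.1)) := by
    rw [hretdef, pv_keys_foldl, PySem.Dict.keys_empty, PySem.Set.update_nil_left]
  have hitems : ret.items.map (fun kv => (kv.1, PySem.List.sorted (PySem.Set.ofList kv.2) (fun x => x) false))
      = (PySem.Set.ofList (P.map (fun p => p.1))).map (pvCanon P) := by
    rw [PySem.Dict.items_eq_map_keys ret hnodup [], List.map_map, hkeys]
    apply List.map_congr_left
    intro k _
    show (k, PySem.List.sorted (PySem.Set.ofList (ret.getD k [])) (fun x => x) false) = pvCanon P k
    rw [hretdef, pv_getD_foldl P PySem.Dict.empty k, PySem.Dict.getD_empty, List.nil_append]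
    rfl
  rw [hret, hitems, hpairs]
  -- the strict key order
  have hnodupK : ((PySem.Set.ofList (P.map (fun p => p.1))).map (pvCanon P)).map (fun p => p.1)
      |>.Nodup := by
    have : ((PySem.Set.ofList (P.map (fun p => p.1))).map (pvCanon P)).map (fun p => p.1)
        = PySem.Set.ofList (P.map (fun p => p.1)) := by
      rw [List.map_map]; exact List.map_id _
    rw [this]; exact PySem.Set.nodup_ofList _
  rw [pv_sorted2_eq_sorted _ _ _ hnodupK]
  -- B's side via the grouping lemma
  have hpw : (PySem.List.sorted P (fun p => p.1) false).Pairwise (fun a b => a.1 ≤ b.1) :=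
    PySem.List.sorted_pairwise P (fun p => p.1)
  rw [pv_group_eq _ hpw]
  have hcanon : (PySem.Set.ofList ((PySem.List.sorted P (fun p => p.1) false).map (fun p => p.1))).map
      (pvCanon (PySem.List.sorted P (fun p => p.1) false))
      = (PySem.Set.ofList ((PySem.List.sorted P (fun p => p.1) false).map (fun p => p.1))).map (pvCanon P) :=
    List.map_congr_left (fun a _ => pv_canon_perm _ _ (PySem.List.sorted_perm P _ _) a)
  rw [hcanon]
  -- both are the strictly key-sorted arrangement of the same per-key entries
  have hKperm : (PySem.Set.ofList ((PySem.List.sorted P (fun p => p.1) false).map (fun p => p.1))).Perm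
      (PySem.Set.ofList (P.map (fun p => p.1))) := by
    rw [List.perm_ext_iff_of_nodup (PySem.Set.nodup_ofList _) (PySem.Set.nodup_ofList _)]
    intro a
    rw [PySem.Set.mem_ofList, PySem.Set.mem_ofList]
    exact ((PySem.List.sorted_perm P (fun p => p.1) false).map (fun p => p.1)).mem_iff
  apply PySem.List.sorted_eq_of_perm_of_pairwise_lt
  · exact hKperm.map (pvCanon P)
  · rw [List.pairwise_map]
    have hle : (PySem.Set.ofList ((PySem.List.sorted P (fun p => p.1) false).map (fun p => p.1))).Pairwise (· ≤ ·) :=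
      List.Pairwise.sublist (pv_ofList_sublist _) (PySem.List.sorted_map_key_pairwise P (fun p => p.1))
    have hne : (PySem.Set.ofList ((PySem.List.sorted P (fun p => p.1) false).map (fun p => p.1))).Pairwise (· ≠ ·) :=
      PySem.Set.nodup_ofList _
    exact (hle.and hne).imp (fun h => lt_of_le_of_ne h.1 h.2)


-- ===== VERDICT (by name: the statement is the Claim_ definition above) =====
theorem merge_data_files_spec : Claim_equal_merge_data_files := by
  intro srcs _
  unfold Spec_merge_data_files
  exact pv_merge_eq srcs
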